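-- pv_equiv track=rewrite | github.com/lilsweetcaligula/codewars | solutions/python/53.py | substring_test
-- ===== SOURCE A (Python) =====
-- def substring_test(str1, str2):
--     str1, str2 = (s.lower() for s in (str1, str2))
--     suffixes = [
--         str2[start:end]
--             for start in range(len(str2))
--             for end in range(start + 2, len(str2) + 1)]
--     for suffix in suffixes:
--         if suffix in str1:
--             return True
--     return False
-- ===== SOURCE B (Python) =====
-- def substring_test(str1, str2):
--     s1 = str1.lower()
--     s2 = str2.lower()
--     bigrams = set(zip(s1, s1[1:]))
--     return any(p in bigrams for p in zip(s2, s2[1:]))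
-- ===== Notes on version B (the rewrite author's own statement) =====
-- stated objective: faster
-- what changed: Instead of enumerating all O(m^2) substrings of str2 of length >= 2 and scanning str1 for each, B builds a set of adjacent character pairs of str1 once and checks whether any adjacent pair of str2 is in it (a substring of length >= 2 occurs iff one of its bigrams occurs).
import Mathlib
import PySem

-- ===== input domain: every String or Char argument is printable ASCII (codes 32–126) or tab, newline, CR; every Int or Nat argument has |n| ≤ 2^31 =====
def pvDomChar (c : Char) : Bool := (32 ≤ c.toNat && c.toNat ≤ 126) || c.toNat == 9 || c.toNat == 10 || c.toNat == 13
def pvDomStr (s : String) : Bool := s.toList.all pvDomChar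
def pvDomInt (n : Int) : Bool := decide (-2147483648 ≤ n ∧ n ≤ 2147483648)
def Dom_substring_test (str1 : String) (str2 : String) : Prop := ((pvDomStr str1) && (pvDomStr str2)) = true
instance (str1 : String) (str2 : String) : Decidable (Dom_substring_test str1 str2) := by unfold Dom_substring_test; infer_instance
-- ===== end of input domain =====

-- B replaces A's enumeration of all length-≥2 substrings of str2 by a one-pass bigram-set check (objective: faster, asymptotic).

-- ===== PORT A =====
def substring_test (str1 : String) (str2 : String) : Bool :=
  let s := PySem.Chars.lower str1.toList
  let t := PySem.Chars.lower str2.toList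
  let suffixes := (PySem.List.pyRange 0 t.length 1).flatMap
    (fun a => (PySem.List.pyRange (a + 2) ((t.length : Int) + 1) 1).map
      (fun b => PySem.List.slice t (some a) (some b)))
  suffixes.any (fun suf => PySem.Chars.isIn suf s)

-- ===== PORT B =====
def substring_test_alt (str1 : String) (str2 : String) : Bool :=
  let s := PySem.Chars.lower str1.toList
  let t := PySem.Chars.lower str2.toList
  let bigrams := PySem.Set.ofList (s.zip s.tail)
  (t.zip t.tail).any (fun p => PySem.Set.contains bigrams p)

-- ===== PRECONDITION & SPEC =====
def Spec_substring_test (str1 : String) (str2 : String) (out : Bool) : Prop := out = substring_test_alt str1 str2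
instance (str1 : String) (str2 : String) (out : Bool) : Decidable (Spec_substring_test str1 str2 out) := by unfold Spec_substring_test; infer_instance

-- ===== CLAIM (what is proved, stated in full; the proofs are below) =====
def Claim_equal_substring_test : Prop := ∀ (str1 : String) (str2 : String), Dom_substring_test str1 str2 → Spec_substring_test str1 str2 (substring_test str1 str2)

-- ===== LEMMAS AND PROOFS =====

-- an adjacent pair of l is exactly a length-2 infix of l
theorem pv_adj_mem_zip_iff_infix {α : Type} (l : List α) (a b : α) :
    ((a, b) ∈ l.zip l.tail) ↔ [a, b] <:+: l := by
  induction l with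
  | nil => simp
  | cons x xs ih =>
    cases xs with
    | nil =>
      simp only [List.tail_cons, List.zip_nil_right, List.not_mem_nil, false_iff]
      intro h
      have := h.length_le
      simp at this
    | cons y ys =>
      rw [List.infix_cons_iff]
      constructor
      · intro h
        rcases List.mem_cons.mp h with h | h
        · left; cases h; exact ⟨ys, rfl⟩
        · right; exact (ih).mp h
      · intro h
        rcases h with h | h
        · rcases h with ⟨r, hr⟩
          cases hr
          exact List.mem_cons_self
        · exact List.mem_cons_of_mem _ ((ih).mpr h)

-- A's truth condition: some substring of t of length ≥ 2 is an infix of s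
theorem pv_A_iff (s t : List Char) :
    (((PySem.List.pyRange 0 t.length 1).flatMap
        (fun a => (PySem.List.pyRange (a + 2) ((t.length : Int) + 1) 1).map
          (fun b => PySem.List.slice t (some a) (some b)))).any
      (fun suf => PySem.Chars.isIn suf s)) = true ↔
    ∃ u : List Char, u <:+: t ∧ 2 ≤ u.length ∧ u <:+: s := by
  rw [List.any_eq_true]
  constructor
  · rintro ⟨u, hu, hin⟩
    rcases List.mem_flatMap.mp hu with ⟨a, ha, hu⟩
    rcases List.mem_map.mp hu with ⟨b, hb, rfl⟩
    rw [PySem.List.mem_pyRange_one] at ha hb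
    have h0a : 0 ≤ a := ha.1
    have h0b : 0 ≤ b := by omega
    refine ⟨_, ?_, ?_, (PySem.Chars.isIn_iff_infix _ _).mp hin⟩
    · rw [PySem.List.slice_toNat _ h0a h0b]
      exact ((List.take_prefix _ _).isInfix).trans (List.drop_suffix _ _).isInfix
    · rw [PySem.List.slice_toNat _ h0a h0b, List.length_take, List.length_drop]
      have hblen : b ≤ (t.length : Int) := by omega
      omega
  · rintro ⟨u, hut, hlen, hus⟩
    rcases hut with ⟨p, q, rfl⟩
    refine ⟨PySem.List.slice (p ++ u ++ q) (some (p.length : Int))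
        (some ((p.length : Int) + (u.length : Int))), ?_, ?_⟩
    · apply List.mem_flatMap.mpr
      refine ⟨(p.length : Int), ?_, ?_⟩
      · rw [PySem.List.mem_pyRange_one]
        constructor
        · exact Int.natCast_nonneg _
        · simp only [List.length_append]
          push_cast
          omega
      · apply List.mem_map.mpr
        refine ⟨(p.length : Int) + (u.length : Int), ?_, rfl⟩
        rw [PySem.List.mem_pyRange_one]
        simp only [List.length_append]
        push_cast
        omega
    · rw [PySem.List.slice_natCast_add]
      have hdrop : (p ++ u ++ q).drop p.length = u ++ q := by
        rw [List.append_assoc, List.drop_append_of_le_length (le_refl _), List.drop_length,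
          List.nil_append]
      rw [hdrop, List.take_append_of_le_length (le_refl _), List.take_length]
      exact (PySem.Chars.isIn_iff_infix _ _).mpr hus

-- B's truth condition: some bigram of t is an infix of s
theorem pv_B_iff (s t : List Char) :
    ((t.zip t.tail).any
      (fun p => PySem.Set.contains (PySem.Set.ofList (s.zip s.tail)) p)) = true ↔
    ∃ a b : Char, [a, b] <:+: t ∧ [a, b] <:+: s := by
  rw [List.any_eq_true]
  constructor
  · rintro ⟨⟨a, b⟩, hmem, hcon⟩
    refine ⟨a, b, (pv_adj_mem_zip_iff_infix t a b).mp hmem, ?_⟩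
    have := (PySem.Set.contains_iff _ _).mp hcon
    rw [PySem.Set.mem_ofList] at this
    exact (pv_adj_mem_zip_iff_infix s a b).mp this
  · rintro ⟨a, b, ht, hs⟩
    refine ⟨(a, b), (pv_adj_mem_zip_iff_infix t a b).mpr ht, ?_⟩
    rw [PySem.Set.contains_iff, PySem.Set.mem_ofList]
    exact (pv_adj_mem_zip_iff_infix s a b).mpr hs

-- bridge: a length-≥2 common infix exists iff a common bigram exists
theorem pv_bridge (s t : List Char) :
    (∃ u : List Char, u <:+: t ∧ 2 ≤ u.length ∧ u <:+: s) ↔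
    ∃ a b : Char, [a, b] <:+: t ∧ [a, b] <:+: s := by
  constructor
  · rintro ⟨u, hut, hlen, hus⟩
    match u, hlen with
    | a :: b :: r, _ =>
      have hpre : [a, b] <+: a :: b :: r := ⟨r, rfl⟩
      exact ⟨a, b, hpre.isInfix.trans hut, hpre.isInfix.trans hus⟩
  · rintro ⟨a, b, ht, hs⟩
    exact ⟨[a, b], ht, by simp, hs⟩

-- ===== VERDICT (by name: the statement is the Claim_ definition above) =====
theorem substring_test_spec : Claim_equal_substring_test := by
  intro str1 str2 _
  unfold Spec_substring_test substring_test substring_test_alt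
  simp only []
  rw [Bool.eq_iff_iff, pv_A_iff, pv_B_iff, pv_bridge]
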